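-- pv_equiv track=rewrite | github.com/mirasoth/soothe | src/soothe/cognition/goal_engine/discovery.py | extract_goal_description
-- ===== SOURCE A (Python) =====
-- def extract_goal_description(body: str) -> str:
--     """Extract goal description from markdown body (IG-155).
--
--     Takes first paragraph after title.
--
--     Args:
--         body: Markdown body text
--
--     Returns:
--         Goal description text
--     """
--     # Remove title (first # heading)
--     lines = body.split("\n")
--     description_lines = []
--
--     # Skip title and blank lines after it
--     start_idx = 0
--     for i, line in enumerate(lines):
--         if line.strip().startswith("#"):
--             start_idx = i + 1
--             break
--
--     # Collect description lines until next section
--     for line in lines[start_idx:]: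
--         if line.strip().startswith("#") or line.strip().startswith("##"):
--             break
--         if line.strip():
--             description_lines.append(line)
--
--     return "\n".join(description_lines).strip()
-- ===== SOURCE B (Python) =====
-- def extract_goal_description(body: str) -> str:
--     collected = []
--     found_title = False
--     for line in body.split("\n"):
--         s = line.strip()
--         if s.startswith("#"):
--             if found_title:
--                 break
--             found_title = True
--             collected = []
--             continue
--         if s:
--             collected.append(line)
--     return "\n".join(collected).strip()
-- ===== Notes on version B (the rewrite author's own statement) =====
-- stated objective: simpler
-- what changed: Replaced A's two sequential scans (an indexed loop locating the title, then a slice-and-collect loop) by a single stateful forward pass over the lines that resets its accumulator at the first heading and breaks at the next.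
import Mathlib
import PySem

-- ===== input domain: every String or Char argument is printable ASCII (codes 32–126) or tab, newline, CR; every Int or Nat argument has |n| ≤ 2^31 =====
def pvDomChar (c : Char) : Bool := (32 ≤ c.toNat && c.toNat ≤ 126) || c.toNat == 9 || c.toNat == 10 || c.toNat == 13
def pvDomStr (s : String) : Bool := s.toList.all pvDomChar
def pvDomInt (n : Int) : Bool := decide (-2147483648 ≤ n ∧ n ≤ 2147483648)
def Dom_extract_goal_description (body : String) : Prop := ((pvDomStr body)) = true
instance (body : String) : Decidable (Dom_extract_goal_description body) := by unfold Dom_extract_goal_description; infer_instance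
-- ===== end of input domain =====

-- B replaces A's two sequential scans (locate the title, then collect) by one stateful
-- forward pass over the lines; objective: simpler (single pass), same asymptotic cost.
-- Both ports work on List Char (PySem's string representation), exact on the ASCII domain.

-- ===== PORT A =====
-- A's first loop: index of the first line whose strip() starts with '#', plus one; 0 if none
def pvAStart : List (List Char) → Nat → Nat
  | [], _ => 0
  | l :: rest, i =>
      if PySem.Chars.startswith (PySem.Chars.strip l) ['#'] then i + 1
      else pvAStart rest (i + 1)

-- A's second loop: collect non-blank lines until a '#'/'##' line (break = stop the recursion)
def pvACollect : List (List Char) → List (List Char)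
  | [] => []
  | l :: rest =>
      if PySem.Chars.startswith (PySem.Chars.strip l) ['#']
         || PySem.Chars.startswith (PySem.Chars.strip l) ['#', '#'] then []
      else if PySem.Chars.strip l ≠ [] then l :: pvACollect rest
      else pvACollect rest

def extract_goal_description (body : String) : String :=
  let lines := PySem.Chars.splitOn body.toList ['\n']
  -- lines[start_idx:] with a nonnegative in-range index = List.drop (exact here)
  String.ofList (PySem.Chars.strip (PySem.Chars.join ['\n'] (pvACollect (List.drop (pvAStart lines 0) lines))))

-- ===== PORT B =====
-- B's single pass, state = (collected, found_title); first '#' line resets, the next breaks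
def pvBLoop : List (List Char) → List (List Char) → Bool → List (List Char)
  | [], acc, _ => acc
  | l :: rest, acc, found =>
      let s := PySem.Chars.strip l
      if PySem.Chars.startswith s ['#'] then
        if found then acc else pvBLoop rest [] true
      else if s ≠ [] then pvBLoop rest (acc ++ [l]) found
      else pvBLoop rest acc found

def extract_goal_description_alt (body : String) : String :=
  String.ofList (PySem.Chars.strip (PySem.Chars.join ['\n']
    (pvBLoop (PySem.Chars.splitOn body.toList ['\n']) [] false)))

-- ===== PRECONDITION & SPEC =====
def Spec_extract_goal_description (body : String) (out : String) : Prop := out = extract_goal_description_alt body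
instance (body : String) (out : String) : Decidable (Spec_extract_goal_description body out) := by unfold Spec_extract_goal_description; infer_instance

-- ===== CLAIM (what is proved, stated in full; the proofs are below) =====
def Claim_equal_extract_goal_description : Prop := ∀ (body : String), Dom_extract_goal_description body → Spec_extract_goal_description body (extract_goal_description body)

-- ===== LEMMAS AND PROOFS =====

-- a line qualifying as title
def pvIsT (l : List Char) : Bool := PySem.Chars.startswith (PySem.Chars.strip l) ['#']

-- the suffix after the first title line (proof-side characterisation of A's first loop)
def pvAfterTitle : List (List Char) → List (List Char)
  | [] => []
  | l :: rest => if pvIsT l then rest else pvAfterTitle rest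

lemma pvStartswith_hh {s : List Char} (h : PySem.Chars.startswith s ['#', '#'] = true) :
    PySem.Chars.startswith s ['#'] = true := by
  rw [PySem.Chars.startswith_iff] at h ⊢
  exact List.IsPrefix.trans ⟨['#'], rfl⟩ h

-- A's '#' or '##' test collapses to the '#' test
lemma pvACollect_cons (l : List Char) (rest : List (List Char)) :
    pvACollect (l :: rest) =
      if pvIsT l then []
      else if PySem.Chars.strip l ≠ [] then l :: pvACollect rest
      else pvACollect rest := by
  simp only [pvACollect, pvIsT]
  by_cases h : PySem.Chars.startswith (PySem.Chars.strip l) ['#'] = true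
  · simp [h]
  · have h2 : PySem.Chars.startswith (PySem.Chars.strip l) ['#', '#'] = false := by
      cases hh : PySem.Chars.startswith (PySem.Chars.strip l) ['#', '#']
      · rfl
      · exact absurd (pvStartswith_hh hh) h
    simp [h, h2]

lemma pvAStart_found (lines : List (List Char)) (i : Nat)
    (h : lines.any pvIsT = true) : i < pvAStart lines i := by
  induction lines generalizing i with
  | nil => simp at h
  | cons l rest ih =>
    simp only [pvAStart]
    by_cases hl : PySem.Chars.startswith (PySem.Chars.strip l) ['#'] = true
    · simp [hl]
    · simp only [List.any_cons, pvIsT, hl, Bool.false_or] at h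
      rw [if_neg hl]
      exact Nat.lt_trans (Nat.lt_succ_self i) (ih (i + 1) h)

lemma pvAStart_drop (lines : List (List Char)) (i : Nat)
    (h : lines.any pvIsT = true) :
    List.drop (pvAStart lines i - i) lines = pvAfterTitle lines := by
  induction lines generalizing i with
  | nil => simp at h
  | cons l rest ih =>
    by_cases hl : pvIsT l
    · have hl' : PySem.Chars.startswith (PySem.Chars.strip l) ['#'] = true := hl
      simp [pvAStart, pvAfterTitle, hl, hl']
    · have hl' : ¬ PySem.Chars.startswith (PySem.Chars.strip l) ['#'] = true := hl
      simp only [List.any_cons, hl, Bool.false_or] at h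
      have hgt := pvAStart_found rest (i + 1) h
      simp only [pvAStart, if_neg hl', pvAfterTitle, if_neg hl]
      have h1 : pvAStart rest (i + 1) - i = (pvAStart rest (i + 1) - (i + 1)) + 1 := by omega
      rw [h1, List.drop_succ_cons, ih (i + 1) h]

lemma pvAStart_none (lines : List (List Char)) (i : Nat)
    (h : lines.any pvIsT = false) : pvAStart lines i = 0 := by
  induction lines generalizing i with
  | nil => rfl
  | cons l rest ih =>
    simp only [List.any_cons, Bool.or_eq_false_iff, pvIsT] at h
    simp [pvAStart, h.1, ih (i + 1) (by simpa [pvIsT] using h.2)]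

lemma pvBLoop_true (lines : List (List Char)) (acc : List (List Char)) :
    pvBLoop lines acc true = acc ++ pvACollect lines := by
  induction lines generalizing acc with
  | nil => simp [pvBLoop, pvACollect]
  | cons l rest ih =>
    rw [pvACollect_cons]
    by_cases hl : pvIsT l
    · have hl' : PySem.Chars.startswith (PySem.Chars.strip l) ['#'] = true := hl
      simp [pvBLoop, hl, hl']
    · have hl' : ¬ PySem.Chars.startswith (PySem.Chars.strip l) ['#'] = true := hl
      by_cases hb : PySem.Chars.strip l ≠ []
      · simp [pvBLoop, hl', hb, ih, hl]
      · simp [pvBLoop, hl', hb, ih, hl]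

lemma pvBLoop_false (lines : List (List Char)) (acc : List (List Char)) :
    pvBLoop lines acc false =
      if lines.any pvIsT then pvACollect (pvAfterTitle lines)
      else acc ++ pvACollect lines := by
  induction lines generalizing acc with
  | nil => simp [pvBLoop, pvACollect]
  | cons l rest ih =>
    by_cases hl : pvIsT l
    · have hl' : PySem.Chars.startswith (PySem.Chars.strip l) ['#'] = true := hl
      simp [pvBLoop, hl', pvBLoop_true, pvAfterTitle, hl, List.any_cons]
    · have hl' : ¬ PySem.Chars.startswith (PySem.Chars.strip l) ['#'] = true := hl
      simp only [List.any_cons, hl, Bool.false_or, pvAfterTitle]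
      rw [pvACollect_cons]
      by_cases hb : PySem.Chars.strip l ≠ []
      · simp only [pvBLoop, if_neg hl', if_pos hb]
        rw [ih]
        by_cases hr : rest.any pvIsT
        · simp [hr]
        · simp [hr, hl]
      · simp only [pvBLoop, if_neg hl', if_neg hb]
        rw [ih]
        by_cases hr : rest.any pvIsT
        · simp [hr]
        · simp [hr, hl]

-- ===== VERDICT (by name: the statement is the Claim_ definition above) =====
theorem extract_goal_description_spec : Claim_equal_extract_goal_description := by
  intro body _
  unfold Spec_extract_goal_description extract_goal_description extract_goal_description_alt
  rw [pvBLoop_false]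
  by_cases h : (PySem.Chars.splitOn body.toList ['\n']).any pvIsT
  · rw [if_pos h]
    have := pvAStart_drop (PySem.Chars.splitOn body.toList ['\n']) 0 h
    simp only [Nat.sub_zero] at this
    simp only [this]
  · rw [if_neg h]
    simp only [pvAStart_none _ _ (by simpa using h), List.drop_zero, List.nil_append]
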